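-- pv_equiv track=rewrite | github.com/antibagr/python-workshop | WorkShop/learning/foobar.py | stupid_asterisk
-- ===== SOURCE A (Python) =====
-- def stupid_asterisk(string: str) -> None:
--     substring_length = 1
--
--     best_match = "Just a legend"
--     len_string = len(string)
--
--     while substring_length < len_string:
--         start = string[:substring_length]
--         if start == string[len_string - substring_length :] and string[1:-1].count(
--             start
--         ):
--             best_match = start
--         substring_length += 1
--     return best_match
-- ===== SOURCE B (Python) =====
-- def _lcp(string, i):
--     # length of the longest common prefix of string and string[i:]
--     n = len(string)
--     j = 0
--     while i + j < n and string[j] == string[i + j]: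
--         j += 1
--     return j
--
--
-- def stupid_asterisk(string: str) -> None:
--     n = len(string)
--     # cap = longest prefix of string that occurs inside string[1:-1].
--     # (The set of prefix lengths occurring in the interior is downward closed,
--     # so "prefix of length k occurs in the interior" is exactly k <= cap.)
--     cap = 0
--     for i in range(1, n - 1):
--         cap = max(cap, min(_lcp(string, i), n - 1 - i))
--     # a prefix of length k is also a suffix iff _lcp(string, n - k) == k
--     best = "Just a legend"
--     for k in range(1, n):
--         if _lcp(string, n - k) == k and k <= cap:
--             best = string[:k]
--     return best
-- ===== Notes on version B (the rewrite author's own statement) =====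
-- stated objective: alternative
-- what changed: B never slices candidate substrings or calls count/endswith: it computes longest-common-prefix lengths lcp(s, s[i:]) by direct character matching, folds them into a single threshold cap = longest prefix occurring in the interior (using that the set of prefix lengths occurring in s[1:-1] is downward closed), and recognises a border of length k by the arithmetic test lcp(s, s[n-k:]) == k and k <= cap, instead of A's per-length slice comparison plus a substring count over the interior.
import Mathlib
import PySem

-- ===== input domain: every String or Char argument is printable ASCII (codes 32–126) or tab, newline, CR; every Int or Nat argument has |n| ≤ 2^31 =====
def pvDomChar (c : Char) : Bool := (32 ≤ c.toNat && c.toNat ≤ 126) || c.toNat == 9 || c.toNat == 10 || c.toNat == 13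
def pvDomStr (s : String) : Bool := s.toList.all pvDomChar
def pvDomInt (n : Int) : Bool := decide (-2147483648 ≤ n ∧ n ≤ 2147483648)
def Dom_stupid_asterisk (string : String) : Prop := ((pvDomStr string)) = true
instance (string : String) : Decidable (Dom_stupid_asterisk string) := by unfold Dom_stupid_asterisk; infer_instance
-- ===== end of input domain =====

-- B replaces A's slice-and-count scan by a longest-common-prefix routine: a threshold cap
-- (longest prefix occurring in the interior, valid by downward closure) plus a border test
-- lcp(s, s[n-k:]) == k; an alternative algorithm, not measured faster.
-- ===== PORT A =====
-- Port of A: ascending while-loop keeping the last (longest) matching prefix in an accumulator.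
def stupid_asterisk (string : String) : String :=
  let len_string : Int := PySem.Str.len string
  (PySem.List.pyRange 1 len_string 1).foldl
    (fun best_match substring_length =>
      let start := PySem.Str.slice string none (some substring_length)
      if start == PySem.Str.slice string (some (len_string - substring_length)) none
          && (PySem.Str.count (PySem.Str.slice string (some 1) (some (-1))) start != 0)
      then start
      else best_match)
    "Just a legend"

-- ===== PORT B =====
-- Port of B's _lcp: while i + j < n and string[j] == string[i+j]: j += 1
def pvLcpGo (s : String) (n i j : Int) : Int :=
  if h : i + j < n ∧ (PySem.Str.pyGet? s j == PySem.Str.pyGet? s (i + j)) = true then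
    pvLcpGo s n i (j + 1)
  else j
termination_by (n - (i + j)).toNat
decreasing_by
  obtain ⟨h1, -⟩ := h
  omega

def pvLcp (s : String) (i : Int) : Int := pvLcpGo s (PySem.Str.len s) i 0

-- Port of B: cap = longest prefix occurring in the interior, then border test via _lcp.
def stupid_asterisk_alt (string : String) : String :=
  let n : Int := PySem.Str.len string
  let cap : Int :=
    (PySem.List.pyRange 1 (n - 1) 1).foldl
      (fun cap i => max cap (min (pvLcp string i) (n - 1 - i))) 0
  (PySem.List.pyRange 1 n 1).foldl
    (fun best k =>
      if pvLcp string (n - k) == k && decide (k ≤ cap)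
      then PySem.Str.slice string none (some k)
      else best)
    "Just a legend"

-- ===== PRECONDITION & SPEC =====
def Spec_stupid_asterisk (string : String) (out : String) : Prop := out = stupid_asterisk_alt string
instance (string : String) (out : String) : Decidable (Spec_stupid_asterisk string out) := by unfold Spec_stupid_asterisk; infer_instance

-- ===== CLAIM (what is proved, stated in full; the proofs are below) =====
def Claim_equal_stupid_asterisk : Prop := ∀ (string : String), Dom_stupid_asterisk string → Spec_stupid_asterisk string (stupid_asterisk string)

-- ===== LEMMAS AND PROOFS =====

-- Python's str.count is positive exactly when the substring occurs (nonempty needle).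
lemma pvCountGoGe (sub : List Char) (fuel : Nat) (l : List Char) (acc : Nat) :
    acc ≤ PySem.Chars.count.go sub fuel l acc := by
  induction fuel generalizing l acc with
  | zero => simp [PySem.Chars.count.go]
  | succ f ih =>
    cases l with
    | nil => simp [PySem.Chars.count.go]
    | cons h t =>
      rw [PySem.Chars.count.go]
      split
      · exact le_trans (Nat.le_succ acc) (ih _ _)
      · exact ih _ _

lemma pvCountGoGtIff (sub : List Char) (hsub : sub ≠ []) (fuel : Nat) :
    ∀ (l : List Char) (acc : Nat), l.length ≤ fuel →
      (acc < PySem.Chars.count.go sub fuel l acc ↔ sub <:+: l) := by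
  induction fuel with
  | zero =>
    intro l acc hl
    have : l = [] := by
      cases l with
      | nil => rfl
      | cons a t => simp at hl
    subst this
    simp [PySem.Chars.count.go, List.infix_iff_prefix_suffix]
    intro h
    exact hsub h
  | succ f ih =>
    intro l acc hl
    cases l with
    | nil =>
      simp [PySem.Chars.count.go]
      intro h
      exact hsub h
    | cons a t =>
      rw [PySem.Chars.count.go]
      split
      · rename_i hpre
        constructor
        · intro _
          exact ((List.isPrefixOf_iff_prefix).1 hpre).isInfix
        · intro _
          exact Nat.lt_of_lt_of_le (Nat.lt_succ_self acc) (pvCountGoGe _ _ _ _)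
      · rename_i hpre
        have ht : t.length ≤ f := by simpa using hl
        rw [ih t acc ht, List.infix_cons_iff]
        constructor
        · exact Or.inr
        · intro h
          rcases h with h | h
          · exact absurd ((List.isPrefixOf_iff_prefix).2 h) (by simpa using hpre)
          · exact h

lemma pvCountPosIff (s sub : List Char) (hsub : sub ≠ []) :
    (¬ PySem.Chars.count s sub = 0) ↔ sub <:+: s := by
  unfold PySem.Chars.count
  rw [if_neg (by simpa using hsub)]
  have h := pvCountGoGtIff sub hsub s.length s 0 (le_refl _)
  constructor
  · intro hne
    exact h.1 (Nat.pos_of_ne_zero hne)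
  · intro hinf
    exact (h.2 hinf).ne'

-- A length-k prefix equals the length-k tail slice iff it is a suffix.
lemma pvTakeEqDropIffSuffix (cs : List Char) (k : Nat) (hk : k ≤ cs.length) :
    (cs.take k = cs.drop (cs.length - k)) ↔ cs.take k <:+ cs := by
  constructor
  · intro h
    rw [h]
    exact List.drop_suffix _ _
  · intro h
    rcases h with ⟨t, ht⟩
    have hlen : t.length = cs.length - k := by
      have := congrArg List.length ht
      simp [List.length_take, Nat.min_eq_left hk] at this
      omega
    calc cs.take k = (t ++ cs.take k).drop t.length := by simp
      _ = cs.drop t.length := by rw [ht]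
      _ = cs.drop (cs.length - k) := by rw [hlen]

-- Length of the common prefix of two character lists (the value B's _lcp computes).
def pvLcpLen : List Char → List Char → Nat
  | a :: as, b :: bs => if a = b then pvLcpLen as bs + 1 else 0
  | _, _ => 0

lemma pvLcpLen_nil_right (xs : List Char) : pvLcpLen xs [] = 0 := by
  cases xs <;> rfl

lemma pvLcpLen_le_iff (k : Nat) : ∀ (xs ys : List Char),
    k ≤ pvLcpLen xs ys ↔ k ≤ xs.length ∧ k ≤ ys.length ∧ xs.take k = ys.take k := by
  induction k with
  | zero => intro xs ys; simp
  | succ k ih =>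
    intro xs ys
    cases xs with
    | nil => simp [pvLcpLen]
    | cons a as =>
      cases ys with
      | nil => simp [pvLcpLen_nil_right]
      | cons b bs =>
        by_cases hab : a = b
        · subst hab
          simp [pvLcpLen, ih]
        · simp [pvLcpLen, hab]

lemma pvLcpLen_le_length_right (xs ys : List Char) : pvLcpLen xs ys ≤ ys.length :=
  ((pvLcpLen_le_iff _ xs ys).1 (le_refl _)).2.1

-- Str.len in list terms.
lemma pvLenEq (s : String) : PySem.Str.len s = (s.toList.length : Int) := by
  simp [PySem.Str.len]

-- B's _lcp computes pvLcpLen of the string and its suffix.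
lemma pvLcpGo_eq_aux (s : String) (i : Nat) (d : Nat) : ∀ (j : Nat),
    s.toList.length - (i + j) ≤ d →
    pvLcpGo s (PySem.Str.len s) (i : Int) (j : Int) =
      (j : Int) + (pvLcpLen (s.toList.drop j) (s.toList.drop (i + j)) : Int) := by
  induction d with
  | zero =>
    intro j hj
    have hij : s.toList.length ≤ i + j := by omega
    rw [pvLcpGo, dif_neg]
    · rw [List.drop_eq_nil_of_le hij, pvLcpLen_nil_right]
      simp
    · intro hcon
      have := hcon.1
      rw [pvLenEq] at this
      omega
  | succ d ih =>
    intro j hj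
    by_cases hij : i + j < s.toList.length
    · have hjlt : j < s.toList.length := by omega
      have hg1 : PySem.Str.pyGet? s (j : Int) = some (s.toList[j]) := by
        rw [PySem.Str.pyGet?_natCast, List.getElem?_eq_getElem hjlt]
      have hcast : (i : Int) + (j : Int) = ((i + j : Nat) : Int) := by push_cast; ring
      have hg2 : PySem.Str.pyGet? s ((i : Int) + (j : Int)) = some (s.toList[i + j]) := by
        rw [hcast, PySem.Str.pyGet?_natCast, List.getElem?_eq_getElem hij]
      have hd1 : s.toList.drop j = s.toList[j] :: s.toList.drop (j + 1) :=
        List.drop_eq_getElem_cons hjlt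
      have hd2 : s.toList.drop (i + j) = s.toList[i + j] :: s.toList.drop (i + j + 1) :=
        List.drop_eq_getElem_cons hij
      by_cases heq : s.toList[j] = s.toList[i + j]
      · rw [pvLcpGo, dif_pos]
        · have hc1 : (j : Int) + 1 = ((j + 1 : Nat) : Int) := by push_cast; ring
          rw [hc1, ih (j + 1) (by omega)]
          rw [hd1, hd2]
          have hadd : i + (j + 1) = i + j + 1 := by omega
          rw [hadd]
          simp [pvLcpLen, heq]
          ring
        · constructor
          · rw [pvLenEq]
            omega
          · rw [hg1, hg2]
            simp [heq]
      · rw [pvLcpGo, dif_neg]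
        · rw [hd1, hd2]
          simp [pvLcpLen, heq]
        · intro hcon
          have := hcon.2
          rw [hg1, hg2] at this
          simp [heq] at this
    · rw [pvLcpGo, dif_neg]
      · have hnil : s.toList.drop (i + j) = [] := List.drop_eq_nil_of_le (by omega)
        rw [hnil, pvLcpLen_nil_right]
        simp
      · intro hcon
        have := hcon.1
        rw [pvLenEq] at this
        omega

lemma pvLcp_eq (s : String) (i : Nat) :
    pvLcp s (i : Int) = (pvLcpLen s.toList (s.toList.drop i) : Int) := by
  have h := pvLcpGo_eq_aux s i (s.toList.length) 0 (by omega)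
  simpa using h

-- The prefix of length k is a suffix iff lcp with the length-k tail is exactly k.
lemma pvBorderIff (cs : List Char) (k : Nat) (hk : k ≤ cs.length) :
    (cs.take k <:+ cs) ↔ pvLcpLen cs (cs.drop (cs.length - k)) = k := by
  have hlen : (cs.drop (cs.length - k)).length = k := by
    simp
    omega
  constructor
  · intro hsuf
    have he : cs.take k = cs.drop (cs.length - k) :=
      (pvTakeEqDropIffSuffix cs k hk).2 hsuf
    apply le_antisymm
    · calc pvLcpLen cs (cs.drop (cs.length - k)) ≤ (cs.drop (cs.length - k)).length :=
            pvLcpLen_le_length_right _ _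
        _ = k := hlen
    · refine (pvLcpLen_le_iff k cs _).2 ⟨hk, le_of_eq hlen.symm, ?_⟩
      rw [he, List.take_of_length_le (le_of_eq hlen)]
  · intro hlcp
    have h := (pvLcpLen_le_iff k cs (cs.drop (cs.length - k))).1 (le_of_eq hlcp.symm)
    have : cs.take k = cs.drop (cs.length - k) := by
      rw [h.2.2, List.take_of_length_le (le_of_eq hlen)]
    exact (pvTakeEqDropIffSuffix cs k hk).1 this

-- The prefix of length k occurs at offset i iff lcp at i is at least k.
lemma pvPrefixDropIff (cs : List Char) (k i : Nat) (hk : k ≤ cs.length) :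
    cs.take k <+: cs.drop i ↔ k ≤ pvLcpLen cs (cs.drop i) := by
  constructor
  · intro h
    rcases h with ⟨t, ht⟩
    have hlen : k ≤ (cs.drop i).length := by
      have := congrArg List.length ht
      simp [Nat.min_eq_left hk] at this
      rw [List.length_drop]
      omega
    refine (pvLcpLen_le_iff k cs (cs.drop i)).2 ⟨hk, hlen, ?_⟩
    have : (cs.drop i).take k = cs.take k := by
      rw [← ht, List.take_append_of_le_length (by simp [Nat.min_eq_left hk]),
        List.take_take, Nat.min_self]
    exact this.symm
  · intro h
    have hh := (pvLcpLen_le_iff k cs (cs.drop i)).1 h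
    rw [hh.2.2]
    exact List.take_prefix _ _

-- A prefix fits inside a take iff it is a prefix and short enough.
lemma pvPrefixTake (l₁ l₂ : List Char) (n : Nat) (h : l₁ <+: l₂) (hn : l₁.length ≤ n) :
    l₁ <+: l₂.take n := by
  rcases h with ⟨t, rfl⟩
  refine ⟨t.take (n - l₁.length), ?_⟩
  rw [List.take_append, List.take_of_length_le hn]

-- string[1:-1] as drop/take.
lemma pvInteriorEq (cs : List Char) :
    PySem.List.slice cs (some 1) (some (-1)) = (cs.drop 1).take (cs.length - 2) := by
  simp [PySem.List.slice, PySem.List.clampIdx]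
  by_cases h : cs = []
  · subst h
    simp
  · have hlen : 1 ≤ cs.length := List.length_pos_iff.2 h
    rw [if_neg h, Nat.min_eq_left hlen, List.drop_one]
    congr 1
    omega

-- The prefix of length k ≥ 1 occurs in the interior iff it occurs at some offset 1 ≤ i, i + k ≤ n - 1.
lemma pvInfixInteriorIff (cs : List Char) (k : Nat) (hk1 : 1 ≤ k) (hk : k ≤ cs.length) :
    (cs.take k <:+: (cs.drop 1).take (cs.length - 2)) ↔
      ∃ i : Nat, 1 ≤ i ∧ i + k ≤ cs.length - 1 ∧ k ≤ pvLcpLen cs (cs.drop i) := by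
  have hklen : (cs.take k).length = k := by simp [Nat.min_eq_left hk]
  constructor
  · intro h
    rcases List.infix_iff_prefix_suffix.1 h with ⟨t, hpre, hsuf⟩
    rcases hsuf with ⟨u, hu⟩
    have ht : t = ((cs.drop 1).take (cs.length - 2)).drop u.length := by
      rw [← hu]; simp
    rw [ht, List.drop_take, List.drop_drop] at hpre
    have hlen : k ≤ cs.length - 2 - u.length := by
      have h1 := hpre.length_le
      rw [hklen] at h1
      simp only [List.length_take, List.length_drop] at h1
      omega
    refine ⟨1 + u.length, by omega, by omega, ?_⟩
    have : cs.take k <+: cs.drop (1 + u.length) := by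
      have h2 : (cs.drop (1 + u.length)).take (cs.length - 2 - u.length) <+: cs.drop (1 + u.length) :=
        List.take_prefix _ _
      exact hpre.trans h2
    exact (pvPrefixDropIff cs k (1 + u.length) hk).1 this
  · rintro ⟨i, hi1, hik, hlcp⟩
    have hpre : cs.take k <+: cs.drop i := (pvPrefixDropIff cs k i hk).2 hlcp
    have hpre2 : cs.take k <+: (cs.drop i).take (cs.length - 2 - (i - 1)) := by
      refine pvPrefixTake _ _ _ hpre ?_
      rw [hklen]
      omega
    have heq : (cs.drop i).take (cs.length - 2 - (i - 1)) =
        ((cs.drop 1).take (cs.length - 2)).drop (i - 1) := by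
      rw [List.drop_take, List.drop_drop]
      have h1 : 1 + (i - 1) = i := by omega
      rw [h1]
    rw [heq] at hpre2
    exact List.infix_iff_prefix_suffix.2 ⟨_, hpre2, List.drop_suffix _ _⟩

-- max-fold characterisation for the cap accumulator.
lemma pvFoldlMaxGeIff (l : List Int) (f : Int → Int) : ∀ (a k : Int),
    (k ≤ l.foldl (fun c x => max c (f x)) a ↔ k ≤ a ∨ ∃ x ∈ l, k ≤ f x) := by
  induction l with
  | nil => intro a k; simp
  | cons hd tl ih =>
    intro a k
    rw [List.foldl_cons, ih]
    simp
    tauto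

-- k ≤ cap iff the prefix of length k occurs in the interior (1 ≤ k < n).
lemma pvCapIff (s : String) (k : Nat) (hk1 : 1 ≤ k) (hk : k < s.toList.length) :
    ((k : Int) ≤ (PySem.List.pyRange 1 (PySem.Str.len s - 1) 1).foldl
        (fun cap i => max cap (min (pvLcp s i) (PySem.Str.len s - 1 - i))) 0) ↔
      (s.toList.take k <:+: (s.toList.drop 1).take (s.toList.length - 2)) := by
  rw [pvFoldlMaxGeIff, pvInfixInteriorIff s.toList k hk1 (le_of_lt hk)]
  constructor
  · rintro (h0 | ⟨x, hx, hfx⟩)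
    · omega
    · rw [PySem.List.mem_pyRange_one, pvLenEq] at hx
      have hx1 : 1 ≤ x := hx.1
      have hxn : x < (s.toList.length : Int) - 1 := hx.2
      refine ⟨x.toNat, by omega, ?_, ?_⟩
      · have := (le_min_iff.1 hfx).2
        rw [pvLenEq] at this
        omega
      · have hlcp := (le_min_iff.1 hfx).1
        have : pvLcp s x = pvLcp s ((x.toNat : Nat) : Int) := by
          congr 1
          omega
        rw [this, pvLcp_eq] at hlcp
        omega
  · rintro ⟨i, hi1, hik, hlcp⟩
    right
    refine ⟨(i : Int), ?_, ?_⟩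
    · rw [PySem.List.mem_pyRange_one, pvLenEq]
      omega
    · rw [le_min_iff, pvLcp_eq, pvLenEq]
      constructor
      · omega
      · omega

-- On every index of the scanned range A's loop test equals B's loop test.
lemma pvPredEq (s : String) (k : Int) (h1 : 1 ≤ k) (h2 : k < (s.toList.length : Int)) :
    ((PySem.Str.slice s none (some k) == PySem.Str.slice s (some (PySem.Str.len s - k)) none)
        && (PySem.Str.count (PySem.Str.slice s (some 1) (some (-1)))
              (PySem.Str.slice s none (some k)) != 0))
      = (pvLcp s (PySem.Str.len s - k) == k
          && decide (k ≤ (PySem.List.pyRange 1 (PySem.Str.len s - 1) 1).foldl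
              (fun cap i => max cap (min (pvLcp s i) (PySem.Str.len s - 1 - i))) 0)) := by
  lift k to Nat using (by omega) with kn
  have hkn : kn ≤ s.toList.length := by omega
  have hkn1 : 1 ≤ kn := by omega
  have hknlt : kn < s.toList.length := by omega
  have e1 : (PySem.Str.slice s none (some (kn : Int))).toList = s.toList.take kn := by
    rw [PySem.Str.toList_slice]
    simp only [PySem.Chars.slice_eq_listSlice]
    rw [PySem.List.slice_to _ (by omega)]
    simp
  have e2 : (PySem.Str.slice s (some (PySem.Str.len s - kn)) none).toList
      = s.toList.drop (s.toList.length - kn) := by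
    rw [PySem.Str.toList_slice]
    simp only [PySem.Chars.slice_eq_listSlice]
    rw [PySem.List.slice_from _ (a := PySem.Str.len s - kn) (by rw [pvLenEq]; omega)]
    congr 1
    rw [pvLenEq]
    omega
  have e3 : (PySem.Str.slice s (some 1) (some (-1))).toList
      = (s.toList.drop 1).take (s.toList.length - 2) := by
    rw [PySem.Str.toList_slice]
    simp only [PySem.Chars.slice_eq_listSlice]
    exact pvInteriorEq s.toList
  have hne : s.toList.take kn ≠ [] := by
    rw [Ne, List.take_eq_nil_iff]
    push Not
    constructor
    · omega
    · intro h
      rw [h] at hkn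
      simp at hkn
      omega
  have eB : pvLcp s (PySem.Str.len s - kn)
      = (pvLcpLen s.toList (s.toList.drop (s.toList.length - kn)) : Int) := by
    have : PySem.Str.len s - (kn : Int) = ((s.toList.length - kn : Nat) : Int) := by
      rw [pvLenEq]
      omega
    rw [this, pvLcp_eq]
  rw [Bool.eq_iff_iff]
  simp only [Bool.and_eq_true, beq_iff_eq, bne_iff_ne, ne_eq, decide_eq_true_eq,
    PySem.Str.count_eq]
  rw [eB]
  constructor
  · rintro ⟨hb, hc⟩
    have hbl : s.toList.take kn = s.toList.drop (s.toList.length - kn) := by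
      have := congrArg String.toList hb
      rw [e1, e2] at this
      exact this
    have hsuf := (pvTakeEqDropIffSuffix s.toList kn hkn).1 hbl
    have hinf : s.toList.take kn <:+: (s.toList.drop 1).take (s.toList.length - 2) := by
      have := (pvCountPosIff ((PySem.Str.slice s (some 1) (some (-1))).toList)
        ((PySem.Str.slice s none (some (kn : Int))).toList) (by rw [e1]; exact hne)).1 (by
          simpa using hc)
      rw [e1, e3] at this
      exact this
    constructor
    · have := (pvBorderIff s.toList kn hkn).1 hsuf
      omega
    · exact (pvCapIff s kn hkn1 hknlt).2 hinf
  · rintro ⟨hb, hc⟩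
    have hlcp : pvLcpLen s.toList (s.toList.drop (s.toList.length - kn)) = kn := by omega
    have hsuf := (pvBorderIff s.toList kn hkn).2 hlcp
    have hbl : s.toList.take kn = s.toList.drop (s.toList.length - kn) :=
      (pvTakeEqDropIffSuffix s.toList kn hkn).2 hsuf
    constructor
    · apply String.ext
      rw [e1, e2]
      exact hbl
    · have hinf := (pvCapIff s kn hkn1 hknlt).1 hc
      have := (pvCountPosIff ((PySem.Str.slice s (some 1) (some (-1))).toList)
        ((PySem.Str.slice s none (some (kn : Int))).toList) (by rw [e1]; exact hne)).2 (by
          rw [e1, e3]; exact hinf)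
      simpa using this

-- ===== VERDICT (by name: the statement is the Claim_ definition above) =====
theorem stupid_asterisk_spec : Claim_equal_stupid_asterisk := by
  intro s _
  show stupid_asterisk s = stupid_asterisk_alt s
  unfold stupid_asterisk stupid_asterisk_alt
  simp only []
  apply PySem.List.foldl_congr_mem
  intro acc k hk
  rw [PySem.List.mem_pyRange_one, pvLenEq] at hk
  rw [pvPredEq s k hk.1 hk.2]
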